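-- pv_equiv track=rewrite | github.com/Disha-01-alt/search-engine-information-retrieval | scrapper.py | get_simhash
-- ===== SOURCE A (Python) =====
-- def get_hash(word):
--     p = 53
--     m = 2**64
--     h = 0
--     for i, char in enumerate(word):
--         h = (h + ord(char) * (p**i)) % m
--     return h
--
-- def get_simhash(freq):
--     v = [0] * 64
--     for word, weight in freq.items():
--         whash = get_hash(word)
--         for i in range(64):
--             if (whash >> i) & 1:
--                 v[i] += weight
--             else:
--                 v[i] -= weight
--
--     sim = 0
--     for i in range(64):
--         if v[i] > 0:
--             sim |= (1 << i)
--     return sim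
-- ===== SOURCE B (Python) =====
-- def get_hash(word):
--     p = 53
--     m = 2**64
--     h = 0
--     for i, char in enumerate(word):
--         h = (h + ord(char) * (p**i)) % m
--     return h
--
-- def get_simhash(freq):
--     # Bit-major (column-wise): hash each word once, then decide each of the 64
--     # output bits independently by a signed sum over all words; no 64-slot
--     # accumulator array is kept at all.
--     hw = [(get_hash(word), weight) for word, weight in freq.items()]
--     sim = 0
--     for i in range(64):
--         if sum(wt if (h >> i) & 1 else -wt for h, wt in hw) > 0:
--             sim |= 1 << i
--     return sim
-- ===== Notes on version B (the rewrite author's own statement) =====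
-- stated objective: alternative
-- what changed: B transposes the computation: instead of A's word-major pass that mutates a 64-slot signed tally v and then thresholds each slot, B precomputes (hash, weight) pairs once and computes each of the 64 output bits independently as a signed sum over all words (column-wise), keeping no accumulator array.
import Mathlib
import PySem

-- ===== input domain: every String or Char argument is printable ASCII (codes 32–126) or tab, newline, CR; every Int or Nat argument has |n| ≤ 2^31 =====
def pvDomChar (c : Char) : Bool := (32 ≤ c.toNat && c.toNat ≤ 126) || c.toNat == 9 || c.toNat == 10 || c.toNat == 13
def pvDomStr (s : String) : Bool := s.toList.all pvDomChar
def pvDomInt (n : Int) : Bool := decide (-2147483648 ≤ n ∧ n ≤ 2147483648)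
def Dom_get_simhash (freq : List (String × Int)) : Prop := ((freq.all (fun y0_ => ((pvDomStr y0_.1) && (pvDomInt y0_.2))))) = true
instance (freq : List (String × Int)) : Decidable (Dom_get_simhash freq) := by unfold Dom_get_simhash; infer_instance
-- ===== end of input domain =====

-- B transposes A's word-major mutation of a 64-slot signed tally into a bit-major
-- (column-wise) computation: hashes are precomputed once, and each output bit is
-- decided by a signed sum over all words; no accumulator array exists in B.

-- ===== PORT A =====
-- ord(char), h and the modulus are all nonnegative, so Nat `%` matches Python `%` exactly here.
def get_hash (word : String) : Nat :=
  (PySem.List.enumerate word.toList).foldl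
    (fun h ic => (h + ic.2.toNat * 53 ^ ic.1.toNat) % (2 ^ 64)) 0

-- v always has length 64 and every index i < 64, so `getD i 0` is Python's v[i] exactly;
-- the single-use local `whash = get_hash(word)` is inlined.
def get_simhash (freq : List (String × Int)) : Int :=
  let v : List Int := freq.foldl (fun v p =>
    (List.range 64).foldl (fun v i =>
      if (get_hash p.1 >>> i) &&& 1 = 1 then v.set i (v.getD i 0 + p.2)
      else v.set i (v.getD i 0 - p.2)) v) (List.replicate 64 0)
  let sim : Nat := (List.range 64).foldl
    (fun sim i => if v.getD i 0 > 0 then sim ||| (1 <<< i) else sim) 0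
  (sim : Int)

-- ===== PORT B =====
def get_simhash_alt (freq : List (String × Int)) : Int :=
  let hw : List (Nat × Int) := freq.map (fun p => (get_hash p.1, p.2))
  let sim : Nat := (List.range 64).foldl (fun sim i =>
    if (hw.map (fun q => if (q.1 >>> i) &&& 1 = 1 then q.2 else -q.2)).sum > 0
    then sim ||| (1 <<< i) else sim) 0
  (sim : Int)

-- ===== PRECONDITION & SPEC =====
def Spec_get_simhash (freq : List (String × Int)) (out : Int) : Prop := out = get_simhash_alt freq
instance (freq : List (String × Int)) (out : Int) : Decidable (Spec_get_simhash freq out) := by unfold Spec_get_simhash; infer_instance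

-- ===== CLAIM (what is proved, stated in full; the proofs are below) =====
def Claim_equal_get_simhash : Prop := ∀ (freq : List (String × Int)), Dom_get_simhash freq → Spec_get_simhash freq (get_simhash freq)

-- ===== LEMMAS AND PROOFS =====

theorem getD_set_self (l : List Int) (i : Nat) (h : i < l.length) (a : Int) :
    (l.set i a).getD i 0 = a := by
  simp [List.getD_eq_getElem?_getD, List.getElem?_set_self h]

theorem getD_set_ne (l : List Int) {i j : Nat} (h : i ≠ j) (a : Int) :
    (l.set i a).getD j 0 = l.getD j 0 := by
  simp [List.getD_eq_getElem?_getD, List.getElem?_set_ne h]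

-- A fold over range n that rewrites each slot i to g i v[i]: length is preserved and
-- slot j ends as g j v[j] for j < n, untouched otherwise.
theorem foldl_set_spec (g : Nat → Int → Int) :
    ∀ (n : Nat) (v : List Int), n ≤ v.length →
      ((List.range n).foldl (fun v i => v.set i (g i (v.getD i 0))) v).length = v.length ∧
      ∀ j, ((List.range n).foldl (fun v i => v.set i (g i (v.getD i 0))) v).getD j 0
          = if j < n then g j (v.getD j 0) else v.getD j 0 := by
  intro n
  induction n with
  | zero => intro v _; simp
  | succ n ih =>
    intro v hn
    obtain ⟨hlen, hget⟩ := ih v (by omega)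
    rw [List.range_succ, List.foldl_append]
    simp only [List.foldl_cons, List.foldl_nil]
    refine ⟨by rw [List.length_set, hlen], fun j => ?_⟩
    by_cases hj : j = n
    · subst hj
      rw [getD_set_self _ _ (by omega), hget j]
      simp
    · rw [getD_set_ne _ (Ne.symm hj), hget j]
      by_cases h : j < n
      · simp [h, show j < n + 1 by omega]
      · simp [h, show ¬ (j < n + 1) by omega]

-- Per-bit signed contribution of a list of (word, weight) pairs: B's column sum at bit j.
def colSum (l : List (String × Int)) (j : Nat) : Int :=
  (l.map (fun p => if (get_hash p.1 >>> j) &&& 1 = 1 then p.2 else -p.2)).sum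

-- Loop invariant for A's outer fold: slot j ends as init[j] + colSum l j.
theorem simhash_inv (l : List (String × Int)) :
    ∀ (v : List Int), v.length = 64 →
      (l.foldl (fun v p =>
          (List.range 64).foldl (fun v i =>
            if (get_hash p.1 >>> i) &&& 1 = 1 then v.set i (v.getD i 0 + p.2)
            else v.set i (v.getD i 0 - p.2)) v) v).length = 64 ∧
      ∀ j, j < 64 →
        (l.foldl (fun v p =>
          (List.range 64).foldl (fun v i =>
            if (get_hash p.1 >>> i) &&& 1 = 1 then v.set i (v.getD i 0 + p.2)
            else v.set i (v.getD i 0 - p.2)) v) v).getD j 0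
        = v.getD j 0 + colSum l j := by
  induction l with
  | nil => intro v hv; simp [colSum, hv]
  | cons p t ih =>
    intro v hv
    simp only [List.foldl_cons]
    have hAcongr : (List.range 64).foldl (fun v i =>
          if (get_hash p.1 >>> i) &&& 1 = 1 then v.set i (v.getD i 0 + p.2)
          else v.set i (v.getD i 0 - p.2)) v
        = (List.range 64).foldl (fun v i =>
            v.set i ((fun i x => if (get_hash p.1 >>> i) &&& 1 = 1 then x + p.2 else x - p.2) i (v.getD i 0))) v := by
      apply PySem.List.foldl_congr_mem
      intro acc x _
      by_cases h : (get_hash p.1 >>> x) &&& 1 = 1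
      · rw [if_pos h]; simp only [if_pos h]
      · rw [if_neg h]; simp only [if_neg h]
    obtain ⟨hAlen, hAget⟩ := foldl_set_spec
      (fun i x => if (get_hash p.1 >>> i) &&& 1 = 1 then x + p.2 else x - p.2) 64 v (by omega)
    rw [hAcongr]
    obtain ⟨h1, h2⟩ := ih _ (by rw [hAlen, hv])
    refine ⟨h1, fun j hj => ?_⟩
    rw [h2 j hj, hAget j, if_pos hj]
    simp only [colSum, List.map_cons, List.sum_cons]
    by_cases h : (get_hash p.1 >>> j) &&& 1 = 1
    · simp only [if_pos h]; ring
    · simp only [if_neg h]; ring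

-- Two bit-assembly folds whose conditions agree on every element produce the same result.
theorem fold_sim_congr (P Q : Nat → Prop) [DecidablePred P] [DecidablePred Q] :
    ∀ (l : List Nat), (∀ i ∈ l, P i ↔ Q i) → ∀ (st : Nat),
      l.foldl (fun st i => if P i then st ||| (1 <<< i) else st) st
      = l.foldl (fun st i => if Q i then st ||| (1 <<< i) else st) st := by
  intro l
  induction l with
  | nil => intro _ st; rfl
  | cons x t ih =>
    intro h st
    simp only [List.foldl_cons]
    rw [show (if P x then st ||| (1 <<< x) else st) = (if Q x then st ||| (1 <<< x) else st) by
      have hx : P x ↔ Q x := h x (by simp)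
      by_cases hp : P x
      · rw [if_pos hp, if_pos (hx.mp hp)]
      · rw [if_neg hp, if_neg (fun hq => hp (hx.mpr hq))]]
    exact ih (fun i hi => h i (by simp [hi])) _

-- ===== VERDICT (by name: the statement is the Claim_ definition above) =====
theorem get_simhash_spec : Claim_equal_get_simhash := by
  intro freq _
  unfold Spec_get_simhash get_simhash get_simhash_alt
  simp only [gt_iff_lt]
  obtain ⟨hVlen, hVget⟩ := simhash_inv freq (List.replicate 64 0) (by simp)
  congr 1
  apply fold_sim_congr
  intro i hi
  have hi64 : i < 64 := List.mem_range.mp hi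
  have h0 : (List.replicate 64 (0:Int)).getD i 0 = 0 := by
    rw [List.getD_eq_getElem?_getD, List.getElem?_replicate]
    simp [hi64]
  rw [hVget i hi64, h0]
  have hmap : (freq.map (fun p => (get_hash p.1, p.2))).map
      (fun q : Nat × Int => if (q.1 >>> i) &&& 1 = 1 then q.2 else -q.2)
      = freq.map (fun p => if (get_hash p.1 >>> i) &&& 1 = 1 then p.2 else -p.2) := by
    rw [List.map_map]; rfl
  rw [hmap]
  simp [colSum]
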